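-- pv_equiv track=rewrite | github.com/Usama-Aijaz706/MedBot-Healthcare-AI-Assistant | healthcare_rag.py | _classify_document_content
-- ===== SOURCE A (Python) =====
-- def _classify_document_content(content: str) -> str:
--     """Classify document content into categories."""
--     content_lower = content.lower()
--
--     # Define category keywords
--     categories = {
--         "mental_health": ["anxiety", "depression", "mental", "psychology", "therapy", "counseling"],
--         "physical_health": ["diabetes", "hypertension", "cardiac", "respiratory", "gastrointestinal"],
--         "treatments": ["treatment", "therapy", "medication", "procedure", "surgery"],
--         "wellness": ["wellness", "prevention", "lifestyle", "nutrition", "exercise"],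
--         "emergency": ["emergency", "crisis", "urgent", "acute", "critical"],
--         "pediatrics": ["pediatric", "child", "infant", "adolescent", "young"],
--         "geriatrics": ["geriatric", "elderly", "aging", "senior", "older"]
--     }
--
--     # Find the best matching category
--     best_category = "general"
--     max_score = 0
--
--     for category, keywords in categories.items():
--         score = sum(1 for keyword in keywords if keyword in content_lower)
--         if score > max_score:
--             max_score = score
--             best_category = category
--
--     return best_category
-- ===== SOURCE B (Python) =====
-- def _classify_document_content(content: str) -> str:
--     """Classify document content into categories."""
--     content_lower = content.lower()
--
--     categories = {
--         "mental_health": ["anxiety", "depression", "mental", "psychology", "therapy", "counseling"],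
--         "physical_health": ["diabetes", "hypertension", "cardiac", "respiratory", "gastrointestinal"],
--         "treatments": ["treatment", "therapy", "medication", "procedure", "surgery"],
--         "wellness": ["wellness", "prevention", "lifestyle", "nutrition", "exercise"],
--         "emergency": ["emergency", "crisis", "urgent", "acute", "critical"],
--         "pediatrics": ["pediatric", "child", "infant", "adolescent", "young"],
--         "geriatrics": ["geriatric", "elderly", "aging", "senior", "older"]
--     }
--
--     # Rank all categories at once: stable sort by score, highest first (stability
--     # keeps the earliest category first on ties), then read off the top entry.
--     ranked = sorted(
--         ((cat, sum(1 for kw in kws if kw in content_lower)) for cat, kws in categories.items()),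
--         key=lambda pair: pair[1],
--         reverse=True,
--     )
--     top_cat, top_score = ranked[0]
--     return top_cat if top_score > 0 else "general"
-- ===== Notes on version B (the rewrite author's own statement) =====
-- stated objective: alternative
-- what changed: Selection by running best/max_score tracking is replaced by ranking: B stably sorts the whole (category, score) table by score descending (stability preserves first-wins ties) and reads off the top entry, falling back to 'general' when the top score is 0.
import Mathlib
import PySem

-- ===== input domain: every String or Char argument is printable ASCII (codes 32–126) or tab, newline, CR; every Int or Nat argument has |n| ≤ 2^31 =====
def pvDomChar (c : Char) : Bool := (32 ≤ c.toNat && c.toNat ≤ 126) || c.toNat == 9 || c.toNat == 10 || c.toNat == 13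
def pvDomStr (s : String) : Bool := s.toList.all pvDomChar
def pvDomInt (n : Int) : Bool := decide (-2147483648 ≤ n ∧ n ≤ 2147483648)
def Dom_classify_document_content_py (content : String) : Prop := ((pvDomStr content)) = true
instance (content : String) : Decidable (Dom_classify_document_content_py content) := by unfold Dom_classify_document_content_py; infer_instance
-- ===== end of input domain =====

-- B ranks the whole (category, score) table by a stable descending sort and takes the top entry, instead of A's running best/max_score tracking; same return value.


-- ===== PORT A =====
-- the category/keyword dict literal shared verbatim by both Pythons
def pvCategories : List (String × List String) := [
  ("mental_health", ["anxiety", "depression", "mental", "psychology", "therapy", "counseling"]),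
  ("physical_health", ["diabetes", "hypertension", "cardiac", "respiratory", "gastrointestinal"]),
  ("treatments", ["treatment", "therapy", "medication", "procedure", "surgery"]),
  ("wellness", ["wellness", "prevention", "lifestyle", "nutrition", "exercise"]),
  ("emergency", ["emergency", "crisis", "urgent", "acute", "critical"]),
  ("pediatrics", ["pediatric", "child", "infant", "adolescent", "young"]),
  ("geriatrics", ["geriatric", "elderly", "aging", "senior", "older"])]

def classify_document_content_py (content : String) : String :=
  let content_lower := PySem.Str.lower content
  -- for category, keywords in categories.items(): running (best_category, max_score), strict '>' update
  let r := pvCategories.foldl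
    (fun (acc : String × Int) ckw =>
      let score : Int := (ckw.2.map (fun kw => if PySem.Str.isIn kw content_lower then (1 : Int) else 0)).sum
      if acc.2 < score then (ckw.1, score) else acc)
    ("general", 0)
  r.1

-- ===== PORT B =====
def classify_document_content_py_alt (content : String) : String :=
  let content_lower := PySem.Str.lower content
  -- ranked = sorted((cat, score) generator, key=lambda pair: pair[1], reverse=True)
  let ranked := PySem.List.sorted
    (pvCategories.map (fun ckw =>
      (ckw.1, (ckw.2.map (fun kw => if PySem.Str.isIn kw content_lower then (1 : Int) else 0)).sum)))
    (fun pair => pair.2) true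
  -- top_cat, top_score = ranked[0]; the none branch only totalizes the subscript (ranked is never empty)
  match PySem.List.pyGet? ranked 0 with
  | some top => if 0 < top.2 then top.1 else "general"
  | none => "general"

-- ===== PRECONDITION & SPEC =====
def Spec_classify_document_content_py (content : String) (out : String) : Prop := out = classify_document_content_py_alt content
instance (content : String) (out : String) : Decidable (Spec_classify_document_content_py content out) := by unfold Spec_classify_document_content_py; infer_instance

-- ===== CLAIM =====
def Claim_equal_classify_document_content_py : Prop := ∀ (content : String), Dom_classify_document_content_py content → Spec_classify_document_content_py content (classify_document_content_py content)

-- ===== LEMMAS AND PROOFS =====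

-- per-category score and the score table, proof-side names for the terms both ports compute
def pvSc (cl : String) (ckw : String × List String) : Int :=
  (ckw.2.map (fun kw => if PySem.Str.isIn kw cl then (1 : Int) else 0)).sum

def pvScores (cl : String) : List (String × Int) :=
  pvCategories.map (fun ckw => (ckw.1, pvSc cl ckw))

-- A's running-best step, on already-scored pairs
def pvStepA (a q : String × Int) : String × Int := if a.2 < q.2 then q else a

-- B's insertBy step for sorted(..., key=snd, reverse=True)
def pvIns (x : String × Int) (acc : List (String × Int)) : List (String × Int) :=
  PySem.List.insertBy (fun a b => decide (b.2 < a.2)) x acc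

theorem pvA_eq (content : String) :
    classify_document_content_py content
      = ((pvScores (PySem.Str.lower content)).foldl pvStepA ("general", 0)).1 := by
  unfold classify_document_content_py pvScores pvSc pvStepA
  rw [List.foldl_map]

theorem pvB_eq (content : String) :
    classify_document_content_py_alt content
      = (match PySem.List.pyGet?
            (PySem.List.sorted (pvScores (PySem.Str.lower content)) (fun pair => pair.2) true) 0 with
         | some top => if 0 < top.2 then top.1 else "general"
         | none => "general") := by
  unfold classify_document_content_py_alt pvScores pvSc
  rfl

-- scores never decrease along A's fold
theorem pv_score_mono (t : List (String × Int)) :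
    ∀ a : String × Int, a.2 ≤ (t.foldl pvStepA a).2 := by
  induction t with
  | nil => intro a; exact le_refl _
  | cons x t ih =>
    intro a
    simp only [List.foldl_cons]
    by_cases h : a.2 < x.2
    · calc a.2 ≤ x.2 := le_of_lt h
        _ ≤ _ := by simpa [pvStepA, h] using ih x
    · simpa [pvStepA, h] using ih a

-- two seeds with equal scores either both survive untouched or the folds coincide with a strictly larger score
theorem pv_stuck_or_pos (t : List (String × Int)) :
    ∀ a b : String × Int, a.2 = b.2 →
      (t.foldl pvStepA a = a ∧ t.foldl pvStepA b = b) ∨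
      (t.foldl pvStepA a = t.foldl pvStepA b ∧ a.2 < (t.foldl pvStepA a).2) := by
  induction t with
  | nil => intro a b _; exact Or.inl ⟨rfl, rfl⟩
  | cons x t ih =>
    intro a b hab
    by_cases h : a.2 < x.2
    · right
      have hb : b.2 < x.2 := hab ▸ h
      constructor
      · simp only [List.foldl_cons, pvStepA, if_pos h, if_pos hb]
      · simp only [List.foldl_cons, pvStepA, if_pos h]
        exact lt_of_lt_of_le h (pv_score_mono t x)
    · have hb : ¬ b.2 < x.2 := by rw [← hab]; exact h
      simpa only [List.foldl_cons, pvStepA, h, hb, if_false] using ih a b hab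

-- head of insertBy-fold computes A's running best
theorem pv_sort_head (t : List (String × Int)) :
    ∀ (h : String × Int) (tl : List (String × Int)),
      ∃ tl', t.foldl (fun acc x => pvIns x acc) (h :: tl) = (t.foldl pvStepA h) :: tl' := by
  induction t with
  | nil => intro h tl; exact ⟨tl, rfl⟩
  | cons x t ih =>
    intro h tl
    by_cases hc : h.2 < x.2
    · have : pvIns x (h :: tl) = x :: h :: tl := by
        simp [pvIns, PySem.List.insertBy, hc]
      simpa [List.foldl_cons, this, pvStepA, hc] using ih x (h :: tl)
    · have : pvIns x (h :: tl) = h :: pvIns x tl := by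
        simp [pvIns, PySem.List.insertBy, hc]
      simpa [List.foldl_cons, this, pvStepA, hc] using ih h (pvIns x tl)

-- every score in the table is nonnegative
theorem pv_sc_nonneg (cl : String) (ckw : String × List String) : 0 ≤ pvSc cl ckw := by
  unfold pvSc
  apply List.sum_nonneg
  intro x hx
  rcases List.mem_map.mp hx with ⟨kw, _, rfl⟩
  split_ifs <;> norm_num

-- the core equivalence, over an arbitrary nonempty score table with nonnegative scores
theorem pv_main (q : String × Int) (t : List (String × Int)) (hq : 0 ≤ q.2) :
    ((List.foldl pvStepA ("general", 0) (q :: t)).1 : String)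
      = (match PySem.List.pyGet? (PySem.List.sorted (q :: t) (fun pair => pair.2) true) 0 with
         | some top => if 0 < top.2 then top.1 else "general"
         | none => "general") := by
  have hins : PySem.List.sorted (q :: t) (fun pair => pair.2) true
      = (q :: t).foldl (fun acc x => pvIns x acc) [] := by
    rw [PySem.List.sorted_rev_eq_foldl_insertBy]
    rfl
  obtain ⟨tl', htl⟩ := pv_sort_head t q []
  have hsorted : PySem.List.sorted (q :: t) (fun pair => pair.2) true
      = (t.foldl pvStepA q) :: tl' := by
    rw [hins]
    simpa [List.foldl_cons, pvIns, PySem.List.insertBy] using htl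
  rw [hsorted]
  have hget : PySem.List.pyGet? ((t.foldl pvStepA q) :: tl') 0 = some (t.foldl pvStepA q) := by
    simp [PySem.List.pyGet?, PySem.List.pyIdx?]
  rw [hget]
  simp only [List.foldl_cons]
  by_cases hpos : 0 < q.2
  · have hstep : pvStepA ("general", 0) q = q := by simp [pvStepA, hpos]
    rw [hstep]
    have : 0 < (t.foldl pvStepA q).2 := lt_of_lt_of_le hpos (pv_score_mono t q)
    simp [this]
  · have hz : q.2 = 0 := le_antisymm (not_lt.mp hpos) hq
    have hstep : pvStepA ("general", 0) q = ("general", 0) := by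
      simp [pvStepA, hz]
    rw [hstep]
    rcases pv_stuck_or_pos t ("general", 0) q (by simp [hz]) with ⟨h1, h2⟩ | ⟨h1, h2⟩
    · rw [h1, h2]
      simp [hz]
    · rw [h1] at h2 ⊢
      simp [h2]

-- ===== VERDICT =====
theorem classify_document_content_py_spec : Claim_equal_classify_document_content_py := by
  intro content _dom
  unfold Spec_classify_document_content_py
  rw [pvA_eq, pvB_eq]
  rcases hl : pvScores (PySem.Str.lower content) with _ | ⟨q, t⟩
  · exact absurd hl (by simp [pvScores, pvCategories])
  · have hq : 0 ≤ q.2 := by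
      have : q ∈ pvScores (PySem.Str.lower content) := by rw [hl]; exact List.mem_cons_self ..
      rcases List.mem_map.mp this with ⟨ckw, _, rfl⟩
      exact pv_sc_nonneg _ _
    exact pv_main q t hq
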